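-- pv_equiv track=rewrite | github.com/jonloveslegos/Archipelago | worlds/khdays/Rules.py | days_mission_to_day
-- ===== SOURCE A (Python) =====
-- def days_mission_to_day(mission_number: int):
--     day_number = 7
--     for i in range(mission_number):
--         if 17 <= day_number < 22:
--             day_number = 22
--         elif 26 <= day_number < 51:
--             day_number = 51
--         elif 54 <= day_number < 71:
--             day_number = 71
--         elif 79 <= day_number < 94:
--             day_number = 94
--         elif 100 <= day_number < 117:
--             day_number = 117
--         elif 122 <= day_number < 149:
--             day_number = 149
--         elif 156 <= day_number < 171:
--             day_number = 171
--         elif 176 <= day_number < 193: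
--             day_number = 193
--         elif 197 <= day_number < 224:
--             day_number = 224
--         elif 227 <= day_number < 255:
--             day_number = 255
--         elif 258 <= day_number < 277:
--             day_number = 277
--         elif 280 <= day_number < 296:
--             day_number = 296
--         elif 304 <= day_number < 321:
--             day_number = 321
--         elif 326 <= day_number < 352:
--             day_number = 352
--         elif 355 <= day_number < 357:
--             day_number = 357
--         else:
--             day_number += 1
--     return day_number
-- ===== SOURCE B (Python) =====
-- # O(1): the day sequence is piecewise linear; look up the segment start and add the offset.
-- _SEGMENTS = [(0, 7), (11, 22), (16, 51), (20, 71), (29, 94), (36, 117),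
--              (42, 149), (50, 171), (56, 193), (61, 224), (65, 255),
--              (69, 277), (73, 296), (82, 321), (88, 352), (92, 357)]
--
-- def days_mission_to_day(mission_number: int):
--     if mission_number <= 0:
--         return 7
--     for start_m, start_d in reversed(_SEGMENTS):
--         if mission_number >= start_m:
--             return start_d + (mission_number - start_m)
-- ===== Notes on version B (the rewrite author's own statement) =====
-- stated objective: faster
-- what changed: Replaced the per-mission day-by-day simulation loop with a precomputed constant segment table: the day is obtained by locating the segment containing the mission number and adding a constant offset.
import Mathlib
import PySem

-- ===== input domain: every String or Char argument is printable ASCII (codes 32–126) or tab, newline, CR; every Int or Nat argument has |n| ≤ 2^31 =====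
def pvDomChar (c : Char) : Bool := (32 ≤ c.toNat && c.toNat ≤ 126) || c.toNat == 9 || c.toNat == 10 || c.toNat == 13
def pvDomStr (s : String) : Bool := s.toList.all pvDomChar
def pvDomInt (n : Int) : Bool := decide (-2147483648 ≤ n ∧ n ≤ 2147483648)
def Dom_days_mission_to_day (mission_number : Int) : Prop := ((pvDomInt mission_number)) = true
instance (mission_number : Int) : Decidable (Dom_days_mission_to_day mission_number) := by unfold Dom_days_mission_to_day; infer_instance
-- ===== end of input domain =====

-- ===== PORT A =====
-- B replaces A's O(n) day-by-day simulation with an O(1) segment-table lookup; return values only.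
def stepA (d : Int) : Int :=
  if 17 ≤ d ∧ d < 22 then 22
  else if 26 ≤ d ∧ d < 51 then 51
  else if 54 ≤ d ∧ d < 71 then 71
  else if 79 ≤ d ∧ d < 94 then 94
  else if 100 ≤ d ∧ d < 117 then 117
  else if 122 ≤ d ∧ d < 149 then 149
  else if 156 ≤ d ∧ d < 171 then 171
  else if 176 ≤ d ∧ d < 193 then 193
  else if 197 ≤ d ∧ d < 224 then 224
  else if 227 ≤ d ∧ d < 255 then 255
  else if 258 ≤ d ∧ d < 277 then 277
  else if 280 ≤ d ∧ d < 296 then 296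
  else if 304 ≤ d ∧ d < 321 then 321
  else if 326 ≤ d ∧ d < 352 then 352
  else if 355 ≤ d ∧ d < 357 then 357
  else d + 1

def loopA : Nat → Int → Int
  | 0, d => d
  | n + 1, d => loopA n (stepA d)

def days_mission_to_day (mission_number : Int) : Int :=
  loopA mission_number.toNat 7

-- ===== PORT B =====
def segB : List (Int × Int) :=
  [(0, 7), (11, 22), (16, 51), (20, 71), (29, 94), (36, 117),
   (42, 149), (50, 171), (56, 193), (61, 224), (65, 255),
   (69, 277), (73, 296), (82, 321), (88, 352), (92, 357)]

-- scan of the reversed segment table: first segment whose start mission is ≤ m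
def findSeg : List (Int × Int) → Int → Int
  | [], _ => 7
  | (sm, sd) :: rest, m => if sm ≤ m then sd + (m - sm) else findSeg rest m

def days_mission_to_day_alt (mission_number : Int) : Int :=
  if mission_number ≤ 0 then 7
  else findSeg segB.reverse mission_number

-- ===== PRECONDITION & SPEC =====
def Spec_days_mission_to_day (mission_number : Int) (out : Int) : Prop := out = days_mission_to_day_alt mission_number
instance (mission_number : Int) (out : Int) : Decidable (Spec_days_mission_to_day mission_number out) := by unfold Spec_days_mission_to_day; infer_instance

-- ===== CLAIM (what is proved, stated in full; the proofs are below) =====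
def Claim_equal_days_mission_to_day : Prop := ∀ (mission_number : Int), Dom_days_mission_to_day mission_number → Spec_days_mission_to_day mission_number (days_mission_to_day mission_number)

-- ===== LEMMAS AND PROOFS =====

theorem stepA_large {d : Int} (h : 357 ≤ d) : stepA d = d + 1 := by
  unfold stepA
  rw [if_neg (by omega), if_neg (by omega), if_neg (by omega), if_neg (by omega),
      if_neg (by omega), if_neg (by omega), if_neg (by omega), if_neg (by omega),
      if_neg (by omega), if_neg (by omega), if_neg (by omega), if_neg (by omega),
      if_neg (by omega), if_neg (by omega), if_neg (by omega)]

theorem loopA_large : ∀ (n : Nat) (d : Int), 357 ≤ d → loopA n d = d + n := by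
  intro n
  induction n with
  | zero => intro d _; simp [loopA]
  | succ k ih =>
    intro d h
    rw [loopA, stepA_large h, ih (d + 1) (by omega)]
    push_cast; ring

theorem loopA_add : ∀ (a b : Nat) (d : Int), loopA (a + b) d = loopA b (loopA a d) := by
  intro a
  induction a with
  | zero => intro b d; simp [loopA]
  | succ k ih =>
    intro b d
    have : k + 1 + b = (k + b) + 1 := by omega
    rw [this]
    show loopA (k + b) (stepA d) = loopA b (loopA k (stepA d))
    exact ih b (stepA d)

set_option maxRecDepth 4000 in
theorem loopA_92 : loopA 92 7 = 357 := by decide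

set_option maxRecDepth 8000 in
theorem small_cases : ∀ n : Nat, n < 93 → loopA n 7 = days_mission_to_day_alt (n : Int) := by decide

theorem alt_large {m : Int} (h : 92 ≤ m) :
    days_mission_to_day_alt m = 357 + (m - 92) := by
  unfold days_mission_to_day_alt segB findSeg
  simp only [List.reverse]
  rw [if_neg (by omega)]
  simp only [List.reverseAux, findSeg]
  rw [if_pos h]

-- ===== VERDICT (by name: the statement is the Claim_ definition above) =====
theorem days_mission_to_day_spec : Claim_equal_days_mission_to_day := by
  unfold Claim_equal_days_mission_to_day
  intro m _
  unfold Spec_days_mission_to_day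
  by_cases hneg : m ≤ 0
  · have : m.toNat = 0 := by omega
    simp [days_mission_to_day, this, loopA, days_mission_to_day_alt, hneg]
  · have hm : (m.toNat : Int) = m := Int.toNat_of_nonneg (by omega)
    by_cases hb : m < 93
    · have := small_cases m.toNat (by omega)
      rw [hm] at this
      exact this
    · have hsplit : m.toNat = 92 + (m.toNat - 92) := by omega
      unfold days_mission_to_day
      rw [hsplit, loopA_add, loopA_92, loopA_large _ _ (by omega),
        alt_large (by omega)]
      omega
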